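-- pv_equiv track=rewrite | github.com/adamw00000/JsonParser | json_parser.py | __is_first_token_after_whitespace
-- ===== SOURCE A (Python) =====
-- def __is_first_token_after_whitespace(text, start_pos, query_token):
--     pos = start_pos
--     for pos in range(start_pos, len(text)):
--         if not text[pos].isspace():
--             if text[pos] == query_token:
--                 return True, text, pos + 1
--             else:
--                 return False, text, start_pos
--
--     # Invoked when text ends before finding non-whitespace token
--     raise ValueError(f'Invalid JSON format at position {len(text)}: expected "{query_token}"')
-- ===== SOURCE B (Python) =====
-- # B: strip leading whitespace once instead of an explicit index scan; equivalence
-- # is claimed for 0 <= start_pos and inputs where A does not raise (Pre_).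
-- def __is_first_token_after_whitespace(text, start_pos, query_token):
--     remaining = text[start_pos:].lstrip()
--     if not remaining:
--         # text ends before any non-whitespace token
--         raise ValueError(f'Invalid JSON format at position {len(text)}: expected "{query_token}"')
--     pos = len(text) - len(remaining)  # index of the first non-whitespace char
--     if remaining[0] == query_token:
--         return True, text, pos + 1
--     return False, text, start_pos
-- ===== Notes on version B (the rewrite author's own statement) =====
-- stated objective: simpler
-- what changed: Replaces the explicit index-scan loop with a strip-once decomposition: slice off text[start_pos:], lstrip it, and read the answer from the first remaining character and the length difference.
-- outside the precondition, e.g. on __is_first_token_after_whitespace('ab', -1, 'b'): A returns (True, 'ab', 0), B returns (True, 'ab', 2)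
import Mathlib
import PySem

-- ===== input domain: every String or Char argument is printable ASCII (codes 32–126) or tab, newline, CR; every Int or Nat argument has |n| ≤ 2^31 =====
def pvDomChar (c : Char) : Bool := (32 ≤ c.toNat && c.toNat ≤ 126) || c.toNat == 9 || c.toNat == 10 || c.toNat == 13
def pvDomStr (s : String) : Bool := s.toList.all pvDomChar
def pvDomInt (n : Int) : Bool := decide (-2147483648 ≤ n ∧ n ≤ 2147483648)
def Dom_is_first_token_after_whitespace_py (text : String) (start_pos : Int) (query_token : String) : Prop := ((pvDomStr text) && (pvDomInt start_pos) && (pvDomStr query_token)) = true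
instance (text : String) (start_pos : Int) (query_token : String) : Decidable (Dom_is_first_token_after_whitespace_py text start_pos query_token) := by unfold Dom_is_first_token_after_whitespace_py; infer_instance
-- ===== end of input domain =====

-- B strips leading whitespace once instead of A's index scan; proved equal on Pre_ (0 ≤ start_pos, some non-whitespace char at or after it).

-- ===== PORT A =====
-- the for-loop of A over range(start_pos, len(text)); [] = loop exhausted = ValueError, pyGet? none = IndexError (both outside Pre_)
def pvGoA (text : String) (start_pos : Int) (query_token : String) : List Int → Bool × String × Int
  | [] => (false, text, 0)
  | pos :: rest =>
    match PySem.List.pyGet? text.toList pos with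
    | none => (false, text, 0)
    | some c =>
      if !(PySem.Chars.isspace c) then
        if String.mk [c] = query_token then (true, text, pos + 1)
        else (false, text, start_pos)
      else pvGoA text start_pos query_token rest

def is_first_token_after_whitespace_py (text : String) (start_pos : Int) (query_token : String) : Bool × String × Int :=
  pvGoA text start_pos query_token (PySem.List.pyRange start_pos (text.toList.length : Int) 1)

-- ===== PORT B =====
def is_first_token_after_whitespace_py_alt (text : String) (start_pos : Int) (query_token : String) : Bool × String × Int :=
  match PySem.Chars.lstrip (PySem.List.slice text.toList (some start_pos) none) with
  | [] => (false, text, 0)   -- the ValueError branch of B (outside Pre_)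
  | c :: rest =>
    let pos : Int := (text.toList.length : Int) - ((c :: rest).length : Int)
    if String.mk [c] = query_token then (true, text, pos + 1)
    else (false, text, start_pos)

-- ===== PRECONDITION & SPEC =====
-- Pre_ excludes (a) inputs where A raises (ValueError when only whitespace follows start_pos, IndexError for a
-- negative start_pos below -len(text)), and (b) negative start_pos, where A's value comes from Python's
-- negative-index wraparound: outside the function's natural domain of parse positions.
def Pre_is_first_token_after_whitespace_py (text : String) (start_pos : Int) (query_token : String) : Prop :=
  0 ≤ start_pos ∧ (text.toList.drop start_pos.toNat).any (fun c => !PySem.Chars.isspace c) = true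

instance (text : String) (start_pos : Int) (query_token : String) : Decidable (Pre_is_first_token_after_whitespace_py text start_pos query_token) := by unfold Pre_is_first_token_after_whitespace_py; infer_instance

def pvWitness_is_first_token_after_whitespace_py : String × Int × String := (" {", 1, "{")

def Spec_is_first_token_after_whitespace_py (text : String) (start_pos : Int) (query_token : String) (out : Bool × String × Int) : Prop := out = is_first_token_after_whitespace_py_alt text start_pos query_token
instance (text : String) (start_pos : Int) (query_token : String) (out : Bool × String × Int) : Decidable (Spec_is_first_token_after_whitespace_py text start_pos query_token out) := by unfold Spec_is_first_token_after_whitespace_py; infer_instance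

-- ===== CLAIM (what is proved, stated in full; the proofs are below) =====
def Claim_equal_is_first_token_after_whitespace_py : Prop := ∀ (text : String) (start_pos : Int) (query_token : String), Dom_is_first_token_after_whitespace_py text start_pos query_token → Pre_is_first_token_after_whitespace_py text start_pos query_token → Spec_is_first_token_after_whitespace_py text start_pos query_token (is_first_token_after_whitespace_py text start_pos query_token)

-- ===== LEMMAS AND PROOFS =====

-- A's scan from position j equals the dropWhile-isspace characterisation, whenever some
-- non-whitespace character occurs at or after j.
theorem pvGoA_eq (text : String) (sp0 : Int) (q : String) (j : Nat)
    (h : ∃ c ∈ text.toList.drop j, PySem.Chars.isspace c = false) :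
    pvGoA text sp0 q (PySem.List.pyRange (j : Int) (text.toList.length : Int) 1) =
      (match (text.toList.drop j).dropWhile PySem.Chars.isspace with
       | [] => (false, text, 0)
       | c :: rest =>
         if String.mk [c] = q then
           (true, text, ((text.toList.length : Int) - ((c :: rest).length : Int)) + 1)
         else (false, text, sp0)) := by
  by_cases hj : j < text.toList.length
  · have hdrop : text.toList.drop j = text.toList[j] :: text.toList.drop (j + 1) :=
      List.drop_eq_getElem_cons hj
    rw [PySem.List.pyRange_one_cons (by exact_mod_cast hj)]
    unfold pvGoA
    rw [PySem.List.pyGet?_ofNat _ _ hj]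
    by_cases hws : PySem.Chars.isspace text.toList[j] = true
    · -- whitespace: A recurses, dropWhile skips
      simp only [hws, Bool.not_true, Bool.false_eq_true, if_false]
      have h' : ∃ c ∈ text.toList.drop (j + 1), PySem.Chars.isspace c = false := by
        obtain ⟨c, hc, hcf⟩ := h
        rw [hdrop] at hc
        rcases List.mem_cons.mp hc with hc | hc
        · rw [hc, hws] at hcf; simp at hcf
        · exact ⟨c, hc, hcf⟩
      have := pvGoA_eq text sp0 q (j + 1) h'
      rw [show ((j : Int) + 1) = ((j + 1 : Nat) : Int) by push_cast; ring]
      rw [this, hdrop, List.dropWhile_cons_of_pos hws]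
    · -- non-whitespace: A stops here; dropWhile keeps the head
      simp only [Bool.not_eq_true] at hws
      rw [hdrop, List.dropWhile_cons_of_neg (by simp [hws])]
      have hlen : (text.toList.drop (j + 1)).length = text.toList.length - (j + 1) :=
        List.length_drop
      by_cases hq : String.mk [text.toList[j]] = q
      · simp only [hws, Bool.not_false, hq, if_pos, List.length_cons, hlen]
        congr 1
        congr 1
        omega
      · simp [hws, hq]
  · -- j past the end: contradiction with h
    exfalso
    obtain ⟨c, hc, _⟩ := h
    rw [List.drop_eq_nil_of_le (by omega)] at hc
    exact absurd hc (List.not_mem_nil)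
termination_by text.toList.length - j
decreasing_by omega

-- ===== VERDICT (by name: the statement is the Claim_ definition above) =====
theorem is_first_token_after_whitespace_py_spec : Claim_equal_is_first_token_after_whitespace_py := by
  intro text start_pos query_token _ hpre
  obtain ⟨hnn, hany⟩ := hpre
  have hex : ∃ c ∈ text.toList.drop start_pos.toNat, PySem.Chars.isspace c = false := by
    simpa only [List.any_eq_true, Bool.not_eq_true'] using hany
  unfold Spec_is_first_token_after_whitespace_py
  unfold is_first_token_after_whitespace_py is_first_token_after_whitespace_py_alt
  have hsp : start_pos = (start_pos.toNat : Int) := (Int.toNat_of_nonneg hnn).symm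
  rw [hsp, PySem.List.slice_from_natCast, pvGoA_eq text _ query_token start_pos.toNat hex]
  have : PySem.Chars.lstrip (text.toList.drop start_pos.toNat) =
      (text.toList.drop start_pos.toNat).dropWhile PySem.Chars.isspace := rfl
  rw [this]
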